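-- pv_equiv track=rewrite | github.com/Yang011013/LLM_CB2 | src/cb2game/agents/agent_utils.py | get_new_orientation
-- ===== SOURCE A (Python) =====
-- def get_new_orientation(old_orientation, action_string):
--     for action in action_string.split(","):
--         if action == "right":
--             old_orientation -= 60
--         elif action == "left":
--             old_orientation += 60
--         else:
--             continue
--     return old_orientation % 360
-- ===== SOURCE B (Python) =====
-- def get_new_orientation(old_orientation, action_string):
--     parts = action_string.split(",")
--     delta = 60 * (parts.count("left") - parts.count("right"))
--     return (old_orientation + delta) % 360
-- ===== Notes on version B (the rewrite author's own statement) =====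
-- stated objective: simpler
-- what changed: Replaces the step-by-step accumulating loop over actions with a count-then-arithmetic closed form: tally exact 'left'/'right' tokens of the split list and apply the net 60-degree delta once.
import Mathlib
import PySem

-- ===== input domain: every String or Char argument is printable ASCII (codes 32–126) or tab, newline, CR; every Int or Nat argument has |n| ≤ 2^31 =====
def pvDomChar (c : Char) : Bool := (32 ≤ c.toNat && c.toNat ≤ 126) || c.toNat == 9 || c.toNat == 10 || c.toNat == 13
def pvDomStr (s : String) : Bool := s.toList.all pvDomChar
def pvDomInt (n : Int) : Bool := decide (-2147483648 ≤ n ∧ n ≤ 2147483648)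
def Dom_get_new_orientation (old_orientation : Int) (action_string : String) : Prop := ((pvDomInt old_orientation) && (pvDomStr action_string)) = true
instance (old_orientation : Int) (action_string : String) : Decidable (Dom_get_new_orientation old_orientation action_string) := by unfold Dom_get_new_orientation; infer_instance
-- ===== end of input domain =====

-- B replaces A's per-action accumulating loop with a count-then-arithmetic closed form (simpler decomposition).


-- ===== PORT A =====
-- loop: for action in action_string.split(","): if right: -60 elif left: +60 else continue; return acc % 360
def get_new_orientation (old_orientation : Int) (action_string : String) : Int :=
  let acc := ((PySem.Str.split? action_string ",").getD []).foldl
    (fun o action =>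
      if action == "right" then o - 60
      else if action == "left" then o + 60
      else o)
    old_orientation
  PySem.Int.mod acc 360

-- ===== PORT B =====
def get_new_orientation_alt (old_orientation : Int) (action_string : String) : Int :=
  let parts := (PySem.Str.split? action_string ",").getD []
  let delta := 60 * ((parts.count "left" : Int) - (parts.count "right" : Int))
  PySem.Int.mod (old_orientation + delta) 360

-- ===== PRECONDITION & SPEC =====
def Spec_get_new_orientation (old_orientation : Int) (action_string : String) (out : Int) : Prop := out = get_new_orientation_alt old_orientation action_string
instance (old_orientation : Int) (action_string : String) (out : Int) : Decidable (Spec_get_new_orientation old_orientation action_string out) := by unfold Spec_get_new_orientation; infer_instance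

-- ===== CLAIM (what is proved, stated in full; the proofs are below) =====
def Claim_equal_get_new_orientation : Prop := ∀ (old_orientation : Int) (action_string : String), Dom_get_new_orientation old_orientation action_string → Spec_get_new_orientation old_orientation action_string (get_new_orientation old_orientation action_string)

-- ===== LEMMAS AND PROOFS =====
theorem gno_foldl_eq (l : List String) (o : Int) :
    l.foldl (fun o action =>
      if action == "right" then o - 60
      else if action == "left" then o + 60
      else o) o
    = o + 60 * ((l.count "left" : Int) - (l.count "right" : Int)) := by
  induction l generalizing o with
  | nil => simp
  | cons a l ih =>
    simp only [List.foldl_cons, ih, List.count_cons]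
    by_cases hr : a = "right" <;> by_cases hl : a = "left" <;>
      simp [hr, hl] <;> ring

-- ===== VERDICT (by name: the statement is the Claim_ definition above) =====
theorem get_new_orientation_spec : Claim_equal_get_new_orientation := by
  intro o s _
  unfold Spec_get_new_orientation get_new_orientation get_new_orientation_alt
  rw [gno_foldl_eq]
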